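-- pv_equiv track=rewrite | github.com/goOdyaga/PYTHON | code2/ps3.py | part1
-- ===== SOURCE A (Python) =====
-- def part1(current_loc, current_path, maze) :
--   current_path.append(current_loc)
--   if (maze[current_loc]+current_loc>=len(maze)):
--     return []
--   elif (maze[current_loc]+current_loc==len(maze)-1):
--     current_path.append(len(maze)-1)
--     return current_path
--   else:
--     # current_path.append(current_loc)
--     return part1(current_loc+maze[current_loc],current_path,maze)
-- ===== SOURCE B (Python) =====
-- def part1(current_loc, current_path, maze):
--     n = len(maze)
--     chain = [current_loc]
--     while maze[current_loc] + current_loc < n - 1: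
--         current_loc = current_loc + maze[current_loc]
--         chain.append(current_loc)
--     current_path.extend(chain)
--     if maze[current_loc] + current_loc >= n:
--         return []
--     current_path.append(n - 1)
--     return current_path
-- ===== Notes on version B (the rewrite author's own statement) =====
-- stated objective: alternative
-- what changed: B replaces A's recursion (which threads the growing path through every call) with a while loop that first collects the visited chain in a local list and only then extends current_path once and decides between [] and the full path.
import Mathlib
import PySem

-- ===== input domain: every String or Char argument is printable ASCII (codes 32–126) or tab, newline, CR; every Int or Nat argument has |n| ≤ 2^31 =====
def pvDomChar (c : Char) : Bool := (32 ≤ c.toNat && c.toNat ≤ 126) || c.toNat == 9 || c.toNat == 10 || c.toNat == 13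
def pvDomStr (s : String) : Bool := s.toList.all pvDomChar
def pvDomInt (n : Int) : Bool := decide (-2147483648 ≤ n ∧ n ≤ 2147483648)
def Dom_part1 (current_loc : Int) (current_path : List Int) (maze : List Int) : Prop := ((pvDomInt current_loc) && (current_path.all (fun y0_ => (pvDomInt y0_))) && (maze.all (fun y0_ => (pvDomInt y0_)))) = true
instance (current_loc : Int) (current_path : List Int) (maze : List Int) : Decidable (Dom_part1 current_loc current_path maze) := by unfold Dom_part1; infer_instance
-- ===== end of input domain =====

-- B replaces A's recursion by an iterative chain-then-extend loop; same return value and the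
-- same elements appended to current_path in the same order; the equivalence proved is about
-- the return value.

-- ===== PORT A =====
-- A's recursion, fuel-bounded (fuel only makes the recursion total; inside Pre_ it never runs out)
def part1Go (fuel : Nat) (current_loc : Int) (current_path : List Int) (maze : List Int) : List Int :=
  match fuel with
  | 0 => []
  | fuel + 1 =>
    let current_path := current_path ++ [current_loc]
    match PySem.List.pyGet? maze current_loc with
    | none => []  -- IndexError in Python; excluded by Pre_
    | some v =>
      if v + current_loc ≥ (maze.length : Int) then []
      else if v + current_loc = (maze.length : Int) - 1 then
        current_path ++ [(maze.length : Int) - 1]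
      else part1Go fuel (current_loc + v) current_path maze

def part1 (current_loc : Int) (current_path : List Int) (maze : List Int) : List Int :=
  part1Go (2 * maze.length + 1) current_loc current_path maze

-- ===== PORT B =====
-- B's while loop: collect the visited chain locally, remember the final location
def part1Chain (fuel : Nat) (current_loc : Int) (maze : List Int) : List Int × Int :=
  match fuel with
  | 0 => ([current_loc], current_loc)
  | fuel + 1 =>
    match PySem.List.pyGet? maze current_loc with
    | none => ([current_loc], current_loc)  -- IndexError in Python; excluded by Pre_
    | some v =>
      if v + current_loc < (maze.length : Int) - 1 then
        let r := part1Chain fuel (current_loc + v) maze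
        (current_loc :: r.1, r.2)
      else ([current_loc], current_loc)

def part1_alt (current_loc : Int) (current_path : List Int) (maze : List Int) : List Int :=
  let r := part1Chain (2 * maze.length + 1) current_loc maze
  let current_path := current_path ++ r.1
  match PySem.List.pyGet? maze r.2 with
  | none => []
  | some v =>
    if v + r.2 ≥ (maze.length : Int) then []
    else current_path ++ [(maze.length : Int) - 1]

-- ===== PRECONDITION & SPEC =====
-- the input's jump map, its index-range check and its exit condition (not the ports' code)
def pvStep (maze : List Int) (loc : Int) : Int := loc + PySem.List.pyGetD maze loc 0
def pvInR (maze : List Int) (loc : Int) : Bool :=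
  decide (-(maze.length : Int) ≤ loc ∧ loc < (maze.length : Int))
def pvExit (maze : List Int) (loc : Int) : Bool :=
  decide ((maze.length : Int) - 1 ≤ PySem.List.pyGetD maze loc 0 + loc)

-- Pre_ holds exactly when the jump chain from current_loc stays in index range and reaches an
-- exit cell (its first exit step is then ≤ 2·len, since the deterministic chain would otherwise
-- revisit a location and never exit); on the excluded inputs A raises IndexError or RecursionError.
def Pre_part1 (current_loc : Int) (current_path : List Int) (maze : List Int) : Prop :=
  ∃ k ≤ 2 * maze.length,
    (∀ j < k, pvInR maze ((pvStep maze)^[j] current_loc) = true ∧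
              pvExit maze ((pvStep maze)^[j] current_loc) = false) ∧
    pvInR maze ((pvStep maze)^[k] current_loc) = true ∧
    pvExit maze ((pvStep maze)^[k] current_loc) = true
instance (current_loc : Int) (current_path : List Int) (maze : List Int) : Decidable (Pre_part1 current_loc current_path maze) := by unfold Pre_part1; infer_instance
def pvWitness_part1 : Int × List Int × List Int := (0, [5], [2, 4, 1, 1])

def Spec_part1 (current_loc : Int) (current_path : List Int) (maze : List Int) (out : List Int) : Prop := out = part1_alt current_loc current_path maze
instance (current_loc : Int) (current_path : List Int) (maze : List Int) (out : List Int) : Decidable (Spec_part1 current_loc current_path maze out) := by unfold Spec_part1; infer_instance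

-- ===== CLAIM (what is proved, stated in full; the proofs are below) =====
def Claim_equal_part1 : Prop := ∀ (current_loc : Int) (current_path : List Int) (maze : List Int), Dom_part1 current_loc current_path maze → Pre_part1 current_loc current_path maze → Spec_part1 current_loc current_path maze (part1 current_loc current_path maze)

-- ===== LEMMAS AND PROOFS =====

-- core invariant: if the chain's first exit step k is below the fuel, A's recursion equals
-- B's chain-then-extend shape
theorem part1Go_eq_chain (maze : List Int) :
    ∀ (fuel k : Nat) (loc : Int) (path : List Int),
      k < fuel →
      (∀ j < k, pvInR maze ((pvStep maze)^[j] loc) = true ∧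
                pvExit maze ((pvStep maze)^[j] loc) = false) →
      pvInR maze ((pvStep maze)^[k] loc) = true →
      pvExit maze ((pvStep maze)^[k] loc) = true →
      part1Go fuel loc path maze =
        (match PySem.List.pyGet? maze (part1Chain fuel loc maze).2 with
          | none => []
          | some v =>
            if v + (part1Chain fuel loc maze).2 ≥ (maze.length : Int) then []
            else (path ++ (part1Chain fuel loc maze).1) ++ [(maze.length : Int) - 1]) := by
  intro fuel
  induction fuel with
  | zero => intro k loc path hkf; omega
  | succ fuel ih =>
    intro k loc path hkf hpre hin hexit
    have hin0 : pvInR maze loc = true := by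
      cases k with
      | zero => simpa using hin
      | succ m => simpa using (hpre 0 (by omega)).1
    have hrange : PySem.Raise.InRange maze.length loc := by
      simp [pvInR] at hin0; exact ⟨hin0.1, hin0.2⟩
    obtain ⟨v, hv⟩ : ∃ v, PySem.List.pyGet? maze loc = some v := by
      cases h : PySem.List.pyGet? maze loc with
      | none => exact absurd hrange (by simpa [PySem.List.pyGet?_eq_none_iff] using h)
      | some v => exact ⟨v, rfl⟩
    have hvd : PySem.List.pyGetD maze loc 0 = v := by simp [PySem.List.pyGetD, hv]
    cases k with
    | zero =>
      -- loc itself is an exit cell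
      have hex : (maze.length : Int) - 1 ≤ v + loc := by
        simpa [pvExit, hvd] using hexit
      simp only [part1Go, part1Chain, hv]
      rw [if_neg (by omega : ¬ (v + loc < (maze.length : Int) - 1))]
      simp only [hv]
      by_cases hge : v + loc ≥ (maze.length : Int)
      · rw [if_pos hge, if_pos hge]
      · rw [if_neg hge, if_pos (by omega), if_neg hge]
    | succ m =>
      -- loc is not an exit cell: both sides take one step
      have hnex : ¬ ((maze.length : Int) - 1 ≤ v + loc) := by
        have := (hpre 0 (by omega)).2
        simpa [pvExit, hvd] using this
      have hstep : pvStep maze loc = loc + v := by simp [pvStep, hvd]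
      simp only [part1Go, part1Chain, hv]
      rw [if_neg (by omega : ¬ (v + loc ≥ (maze.length : Int))),
          if_neg (by omega : ¬ (v + loc = (maze.length : Int) - 1)),
          if_pos (by omega : v + loc < (maze.length : Int) - 1)]
      have hshift : ∀ j, (pvStep maze)^[j] (loc + v) = (pvStep maze)^[j + 1] loc := by
        intro j
        rw [Function.iterate_succ_apply, hstep]
      have := ih m (loc + v) (path ++ [loc]) (by omega)
        (fun j hj => by rw [hshift j]; exact hpre (j + 1) (by omega))
        (by rw [hshift m]; exact hin)
        (by rw [hshift m]; exact hexit)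
      rw [this]
      cases h2 : PySem.List.pyGet? maze (part1Chain fuel (loc + v) maze).2 with
      | none => simp
      | some w =>
        simp only []
        split <;> simp [List.append_assoc]

-- ===== VERDICT (by name: the statement is the Claim_ definition above) =====
theorem part1_spec : Claim_equal_part1 := by
  intro loc path maze _ hpre
  obtain ⟨k, hk, h1, h2, h3⟩ := hpre
  unfold Spec_part1 part1 part1_alt
  exact part1Go_eq_chain maze (2 * maze.length + 1) k loc path (by omega) h1 h2 h3
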